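-- pv_equiv track=rewrite | github.com/ZhiliShen/Programmer-Code-Interview-Guide | 数组和矩阵问题/边界都是1的最大正方形大小/test.py | set_border_map
-- ===== SOURCE A (Python) =====
-- from typing import List
--
-- def set_border_map(matrix: List[List[int]]):
--     row, col = len(matrix), len(matrix[0])
--     down, right = [[0 for _ in range(col)] for _ in range(row)], [[0 for _ in range(col)] for _ in range(row)]
--
--     # base case
--     if matrix[row - 1][col - 1] == 1:
--         right[row - 1][col - 1], down[row - 1][col - 1] = 1, 1
--
--     for i in range(row - 2, -1, -1):
--         if matrix[i][col - 1] == 1: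
--             down[i][col - 1], right[i][col - 1] = down[i + 1][col - 1] + 1, 1
--         else:
--             down[i][col - 1], right[i][col - 1] = 0, 0  # 这里其实不用写 因为初始化就是0
--
--     for i in range(col - 2, -1, -1):
--         if matrix[row - 1][i] == 1:
--             down[row - 1][i], right[row - 1][i] = 1, right[row - 1][i + 1] + 1
--         else:
--             down[row - 1][i], right[row - 1][i] = 0, 0
--
--     # transfer equation
--     for i in range(row - 2, -1, -1):
--         for j in range(col - 2, -1, -1):
--             if matrix[i][j] == 1:
--                 down[i][j], right[i][j] = down[i + 1][j] + 1, right[i][j + 1] + 1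
--             else:
--                 down[i][j], right[i][j] = 0, 0
--
--     return down, right
-- ===== SOURCE B (Python) =====
-- from typing import List
--
--
-- def _right_row(row):
--     # right-counts of consecutive ones, accumulated right-to-left
--     out = []
--     run = 0
--     for x in reversed(row):
--         run = run + 1 if x == 1 else 0
--         out.append(run)
--     out.reverse()
--     return out
--
--
-- def _down_rows(matrix, col):
--     # bottom-up: each down row is derived from the down row below it
--     rev = []
--     prev = [0] * col
--     for mrow in reversed(matrix):
--         cur = [prev[j] + 1 if mrow[j] == 1 else 0 for j in range(col)]
--         rev.append(cur)
--         prev = cur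
--     rev.reverse()
--     return rev
--
--
-- def set_border_map(matrix: List[List[int]]):
--     col = len(matrix[0])
--     down = _down_rows(matrix, col)
--     right = [_right_row(r[:col]) for r in matrix]
--     return down, right
-- ===== Notes on version B (the rewrite author's own statement) =====
-- stated objective: simpler
-- what changed: Replaces the four corner/last-column/last-row/interior passes mutating preallocated zero matrices by a functional bottom-up decomposition: each down row is derived from the row below it, and each right row is a single right-to-left run-length scan, with no index-written 2D arrays.
import Mathlib
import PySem

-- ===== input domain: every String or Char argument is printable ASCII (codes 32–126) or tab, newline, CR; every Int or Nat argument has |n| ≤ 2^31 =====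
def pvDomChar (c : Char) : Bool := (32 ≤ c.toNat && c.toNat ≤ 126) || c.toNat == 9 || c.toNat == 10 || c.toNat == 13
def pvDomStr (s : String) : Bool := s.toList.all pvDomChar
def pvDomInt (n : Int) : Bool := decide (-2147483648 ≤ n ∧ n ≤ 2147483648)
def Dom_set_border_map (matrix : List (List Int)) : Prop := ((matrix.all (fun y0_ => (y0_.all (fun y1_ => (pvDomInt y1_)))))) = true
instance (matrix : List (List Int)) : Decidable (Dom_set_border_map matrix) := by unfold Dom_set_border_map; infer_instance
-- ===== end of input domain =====

-- B replaces A's four mutating passes over preallocated zero matrices by a functional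
-- bottom-up decomposition (down rows derived from the row below, right rows by a
-- right-to-left run scan); objective: simpler. Pre_ excludes inputs where A raises
-- (empty matrix, zero-width first row, a row shorter than the first row).

-- ===== PORT A =====
-- 2D access/update helpers used by the transliteration of A; exact for the
-- nonnegative in-range indices A uses (Pre_ excludes A's IndexError inputs).
def mGet (m : List (List Int)) (i j : Int) : Int :=
  PySem.List.pyGetD (PySem.List.pyGetD m i []) j 0

def mSet (m : List (List Int)) (i j : Int) (v : Int) : List (List Int) :=
  PySem.List.pySetD m i (PySem.List.pySetD (PySem.List.pyGetD m i []) j v)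

def pass1Step (matrix : List (List Int)) (col : Int)
    (dr : List (List Int) × List (List Int)) (i : Int) : List (List Int) × List (List Int) :=
  if mGet matrix i (col - 1) = 1 then
    (mSet dr.1 i (col - 1) (mGet dr.1 (i + 1) (col - 1) + 1), mSet dr.2 i (col - 1) 1)
  else (mSet dr.1 i (col - 1) 0, mSet dr.2 i (col - 1) 0)

def pass2Step (matrix : List (List Int)) (row : Int)
    (dr : List (List Int) × List (List Int)) (i : Int) : List (List Int) × List (List Int) :=
  if mGet matrix (row - 1) i = 1 then
    (mSet dr.1 (row - 1) i 1, mSet dr.2 (row - 1) i (mGet dr.2 (row - 1) (i + 1) + 1))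
  else (mSet dr.1 (row - 1) i 0, mSet dr.2 (row - 1) i 0)

def pass3Step (matrix : List (List Int)) (i : Int)
    (dr2 : List (List Int) × List (List Int)) (j : Int) : List (List Int) × List (List Int) :=
  if mGet matrix i j = 1 then
    (mSet dr2.1 i j (mGet dr2.1 (i + 1) j + 1), mSet dr2.2 i j (mGet dr2.2 i (j + 1) + 1))
  else (mSet dr2.1 i j 0, mSet dr2.2 i j 0)

def set_border_map (matrix : List (List Int)) : List (List Int) × List (List Int) :=
  let row : Int := PySem.List.len matrix
  let col : Int := PySem.List.len (PySem.List.pyGetD matrix 0 [])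
  let down : List (List Int) :=
    (PySem.List.pyRange 0 row 1).map (fun _ => (PySem.List.pyRange 0 col 1).map (fun _ => (0 : Int)))
  let right : List (List Int) :=
    (PySem.List.pyRange 0 row 1).map (fun _ => (PySem.List.pyRange 0 col 1).map (fun _ => (0 : Int)))
  -- base case
  let dr : List (List Int) × List (List Int) :=
    if mGet matrix (row - 1) (col - 1) = 1 then
      (mSet down (row - 1) (col - 1) 1, mSet right (row - 1) (col - 1) 1)
    else (down, right)
  -- last column
  let dr := (PySem.List.pyRange (row - 2) (-1) (-1)).foldl (pass1Step matrix col) dr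
  -- last row
  let dr := (PySem.List.pyRange (col - 2) (-1) (-1)).foldl (pass2Step matrix row) dr
  -- transfer equation
  let dr := (PySem.List.pyRange (row - 2) (-1) (-1)).foldl
    (fun dr i => (PySem.List.pyRange (col - 2) (-1) (-1)).foldl (pass3Step matrix i) dr) dr
  dr

-- ===== PORT B =====
-- _right_row: right-to-left run scan (loop over reversed(row), append, reverse)
def rightRowB (row : List Int) : List Int :=
  let st := row.reverse.foldl
    (fun (p : List Int × Int) x =>
      let run : Int := if x = 1 then p.2 + 1 else 0
      (p.1 ++ [run], run)) ([], 0)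
  st.1.reverse

-- _down_rows: bottom-up fold, each down row derived from the previous (below) one
def downRowsB (matrix : List (List Int)) (col : Int) : List (List Int) :=
  let st := matrix.reverse.foldl
    (fun (p : List (List Int) × List Int) mrow =>
      let cur := (PySem.List.pyRange 0 col 1).map
        (fun j => if PySem.List.pyGetD mrow j 0 = 1 then PySem.List.pyGetD p.2 j 0 + 1 else 0)
      (p.1 ++ [cur], cur)) ([], (PySem.List.pyRange 0 col 1).map (fun _ => (0 : Int)))
  st.1.reverse

def set_border_map_alt (matrix : List (List Int)) : List (List Int) × List (List Int) :=
  let col : Int := PySem.List.len (PySem.List.pyGetD matrix 0 [])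
  (downRowsB matrix col,
   matrix.map (fun r => rightRowB (PySem.List.slice r (none) (some col))))

-- ===== PRECONDITION & SPEC =====
-- Pre_ is exactly where A returns normally: A raises IndexError on an empty matrix,
-- on a zero-width first row, and on any row shorter than the first row.
def Pre_set_border_map (matrix : List (List Int)) : Prop :=
  matrix ≠ [] ∧ 0 < (matrix.headD []).length ∧
    ∀ r ∈ matrix, (matrix.headD []).length ≤ r.length

instance (matrix : List (List Int)) : Decidable (Pre_set_border_map matrix) := by
  unfold Pre_set_border_map; infer_instance

def pvWitness_set_border_map : List (List Int) := [[1, 1, 0], [1, 1, 1], [0, 1, 1]]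

def Spec_set_border_map (matrix : List (List Int)) (out : List (List Int) × List (List Int)) : Prop := out = set_border_map_alt matrix
instance (matrix : List (List Int)) (out : List (List Int) × List (List Int)) : Decidable (Spec_set_border_map matrix out) := by unfold Spec_set_border_map; infer_instance

-- ===== CLAIM (what is proved, stated in full; the proofs are below) =====
def Claim_equal_set_border_map : Prop := ∀ (matrix : List (List Int)), Dom_set_border_map matrix → Pre_set_border_map matrix → Spec_set_border_map matrix (set_border_map matrix)

-- ===== LEMMAS AND PROOFS =====

-- down/right spec values: consecutive-ones counts below / to the right of a cell
def dAux : List (List Int) → Nat → Int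
  | [], _ => 0
  | rw :: rest, j => if rw.getD j 0 = 1 then dAux rest j + 1 else 0

def rAux : List Int → Int
  | [] => 0
  | x :: rest => if x = 1 then rAux rest + 1 else 0

def dSpec (m : List (List Int)) (i j : Nat) : Int := dAux (m.drop i) j
def rSpec (m : List (List Int)) (c : Nat) (i j : Nat) : Int :=
  rAux (((m.getD i []).take c).drop j)

def specDown (m : List (List Int)) (c : Nat) : List (List Int) :=
  (List.range m.length).map (fun i => (List.range c).map (fun j => dSpec m i j))
def specRight (m : List (List Int)) (c : Nat) : List (List Int) :=
  (List.range m.length).map (fun i => (List.range c).map (fun j => rSpec m c i j))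

def G (d : List (List Int)) (i j : Nat) : Int := (d.getD i []).getD j 0

def Shape (r c : Nat) (d : List (List Int)) : Prop :=
  d.length = r ∧ ∀ rw ∈ d, rw.length = c

def StInv (m : List (List Int)) (r c : Nat) (P : Nat → Nat → Prop)
    (dr : List (List Int) × List (List Int)) : Prop :=
  Shape r c dr.1 ∧ Shape r c dr.2 ∧
  ∀ i j, i < r → j < c →
    (P i j → G dr.1 i j = dSpec m i j ∧ G dr.2 i j = rSpec m c i j) ∧
    (¬ P i j → G dr.1 i j = 0 ∧ G dr.2 i j = 0)

-- basic cast/access lemmas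
theorem mGet_cast (d : List (List Int)) (i j : Nat) : mGet d i j = G d i j := by
  simp [mGet, G]

theorem mSet_cast (d : List (List Int)) (i j : Nat) (v : Int) :
    mSet d i j v = d.set i ((d.getD i []).set j v) := by
  simp [mSet]

theorem G_set {r c : Nat} {d : List (List Int)} (h : Shape r c d) {a b : Nat}
    (ha : a < r) (hb : b < c) (v : Int) (i j : Nat) (hj : j < c) :
    G (d.set a ((d.getD a []).set b v)) i j = if i = a ∧ j = b then v else G d i j := by
  obtain ⟨hlen, hrow⟩ := h
  have hd : a < d.length := by omega
  have hmem : d.getD a [] ∈ d := by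
    rw [List.getD_eq_getElem?_getD, List.getElem?_eq_getElem hd]; exact List.getElem_mem hd
  have hrl : (d.getD a []).length = c := hrow _ hmem
  have hself : ∀ (x : List Int), (d.set a x).getD a [] = x := fun x => by
    rw [List.getD_eq_getElem?_getD, List.getElem?_set_self hd]; rfl
  have hne : ∀ (x : List Int) (i : Nat), i ≠ a → (d.set a x).getD i [] = d.getD i [] :=
    fun x i hia => by
      rw [List.getD_eq_getElem?_getD, List.getElem?_set_ne (fun hh => hia hh.symm),
        ← List.getD_eq_getElem?_getD]
  unfold G
  rcases eq_or_ne i a with rfl | hia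
  · rw [hself]
    rcases eq_or_ne j b with rfl | hjb
    · rw [List.getD_eq_getElem?_getD, List.getElem?_set_self (by omega), Option.getD_some]
      simp
    · rw [List.getD_eq_getElem?_getD, List.getElem?_set_ne (fun hh => hjb hh.symm),
        ← List.getD_eq_getElem?_getD]
      simp [hjb]
  · rw [hne _ _ hia]
    simp [hia]

theorem Shape_set {r c : Nat} {d : List (List Int)} (h : Shape r c d) {a b : Nat}
    (ha : a < r) (v : Int) : Shape r c (d.set a ((d.getD a []).set b v)) := by
  obtain ⟨hlen, hrow⟩ := h
  refine ⟨by simpa using hlen, ?_⟩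
  intro rw hm
  rcases List.mem_or_eq_of_mem_set hm with hm' | rfl
  · exact hrow _ hm'
  · have hd : a < d.length := by omega
    have hmem : d.getD a [] ∈ d := by
      rw [List.getD_eq_getElem?_getD, List.getElem?_eq_getElem hd]; exact List.getElem_mem hd
    simpa using hrow _ hmem

theorem Inv_set {m : List (List Int)} {r c : Nat} {P : Nat → Nat → Prop}
    {dr : List (List Int) × List (List Int)} (h : StInv m r c P dr) {a b : Nat}
    (ha : a < r) (hb : b < c) {vd vr : Int}
    (hvd : vd = dSpec m a b) (hvr : vr = rSpec m c a b) :
    StInv m r c (fun i j => P i j ∨ (i = a ∧ j = b))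
      (dr.1.set a ((dr.1.getD a []).set b vd), dr.2.set a ((dr.2.getD a []).set b vr)) := by
  obtain ⟨hd, hrg, hprop⟩ := h
  refine ⟨Shape_set hd ha vd, Shape_set hrg ha vr, ?_⟩
  intro i j hi hj
  dsimp only
  rw [G_set hd ha hb vd i j hj, G_set hrg ha hb vr i j hj]
  constructor
  · rintro (hP | ⟨rfl, rfl⟩)
    · by_cases hab : i = a ∧ j = b
      · obtain ⟨rfl, rfl⟩ := hab
        rw [if_pos ⟨rfl, rfl⟩, if_pos ⟨rfl, rfl⟩]; exact ⟨hvd, hvr⟩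
      · rw [if_neg hab, if_neg hab]; exact (hprop i j hi hj).1 hP
    · rw [if_pos ⟨rfl, rfl⟩, if_pos ⟨rfl, rfl⟩]; exact ⟨hvd, hvr⟩
  · intro hn
    have h1 : ¬ P i j := fun hp => hn (Or.inl hp)
    have h2 : ¬ (i = a ∧ j = b) := fun hp => hn (Or.inr hp)
    rw [if_neg h2, if_neg h2]
    exact (hprop i j hi hj).2 h1

theorem Inv_weaken {m : List (List Int)} {r c : Nat} {P Q : Nat → Nat → Prop}
    {dr : List (List Int) × List (List Int)} (h : StInv m r c P dr)
    (h1 : ∀ i j, i < r → j < c → P i j → Q i j)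
    (h2 : ∀ i j, i < r → j < c → Q i j → ¬ P i j → dSpec m i j = 0 ∧ rSpec m c i j = 0) :
    StInv m r c Q dr := by
  obtain ⟨hd, hrg, hprop⟩ := h
  refine ⟨hd, hrg, ?_⟩
  intro i j hi hj
  constructor
  · intro hQ
    by_cases hP : P i j
    · exact (hprop i j hi hj).1 hP
    · obtain ⟨e1, e2⟩ := h2 i j hi hj hQ hP
      obtain ⟨g1, g2⟩ := (hprop i j hi hj).2 hP
      exact ⟨g1.trans e1.symm, g2.trans e2.symm⟩
  · intro hQn
    exact (hprop i j hi hj).2 (fun hP => hQn (h1 i j hi hj hP))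

-- spec recurrences
theorem dSpec_eq (m : List (List Int)) (i j : Nat) (hi : i < m.length) :
    dSpec m i j = if (m.getD i []).getD j 0 = 1 then dSpec m (i + 1) j + 1 else 0 := by
  have hg : m.getD i [] = m[i] := by
    rw [List.getD_eq_getElem?_getD, List.getElem?_eq_getElem hi]; rfl
  unfold dSpec
  rw [List.drop_eq_getElem_cons hi]
  simp [dAux, List.getD_eq_getElem?_getD, List.getElem?_eq_getElem hi]

theorem dSpec_bottom (m : List (List Int)) (i j : Nat) (hi : m.length ≤ i) :
    dSpec m i j = 0 := by
  unfold dSpec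
  rw [List.drop_eq_nil_of_le hi]
  rfl

theorem rSpec_eq (m : List (List Int)) (c : Nat) (i j : Nat) (hj : j < c)
    (hc : c ≤ (m.getD i []).length) :
    rSpec m c i j = if (m.getD i []).getD j 0 = 1 then rSpec m c i (j + 1) + 1 else 0 := by
  have hjl : j < ((m.getD i []).take c).length := by
    simp only [List.length_take]; omega
  have hg : (m.getD i []).getD j 0 = (m.getD i [])[j]'(by omega) := by
    rw [List.getD_eq_getElem?_getD, List.getElem?_eq_getElem (by omega)]; rfl
  unfold rSpec
  rw [List.drop_eq_getElem_cons hjl]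
  simp only [rAux]
  have he : ((m.getD i []).take c)[j]'hjl = (m.getD i []).getD j 0 := by
    rw [List.getElem_take]; exact hg.symm
  rw [he]

theorem rSpec_end (m : List (List Int)) (c : Nat) (i : Nat) : rSpec m c i c = 0 := by
  unfold rSpec
  rw [List.drop_eq_nil_of_le (by simp [List.length_take])]
  rfl

theorem G_zeros (r c : Nat) (i j : Nat) :
    G ((PySem.List.pyRange 0 (r : Int) 1).map
        (fun _ => (PySem.List.pyRange 0 (c : Int) 1).map (fun _ => (0 : Int)))) i j = 0 := by
  have hrows : ∀ rw ∈ (PySem.List.pyRange 0 (r : Int) 1).map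
      (fun _ => (PySem.List.pyRange 0 (c : Int) 1).map (fun _ => (0 : Int))),
      ∀ k, rw.getD k 0 = 0 := by
    intro rw hm k
    obtain ⟨a, _, rfl⟩ := List.mem_map.mp hm
    rw [List.getD_eq_getElem?_getD, List.getElem?_map]
    cases (PySem.List.pyRange 0 (c : Int) 1)[k]? <;> simp
  unfold G
  cases hx : ((PySem.List.pyRange 0 (r : Int) 1).map
      (fun _ => (PySem.List.pyRange 0 (c : Int) 1).map (fun _ => (0 : Int))))[i]? with
  | none =>
    rw [List.getD_eq_getElem?_getD (l := (PySem.List.pyRange 0 (r : Int) 1).map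
      (fun _ => (PySem.List.pyRange 0 (c : Int) 1).map (fun _ => (0 : Int)))), hx]
    rfl
  | some rw =>
    have hm := List.mem_of_getElem? hx
    rw [List.getD_eq_getElem?_getD (l := (PySem.List.pyRange 0 (r : Int) 1).map
      (fun _ => (PySem.List.pyRange 0 (c : Int) 1).map (fun _ => (0 : Int)))), hx]
    exact hrows _ hm j

theorem Shape_zeros (r c : Nat) :
    Shape r c ((PySem.List.pyRange 0 (r : Int) 1).map
      (fun _ => (PySem.List.pyRange 0 (c : Int) 1).map (fun _ => (0 : Int)))) := by
  constructor
  · simp [PySem.List.length_pyRange_one]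
  · intro rw hm
    obtain ⟨a, _, rfl⟩ := List.mem_map.mp hm
    simp [PySem.List.length_pyRange_one]

-- pass 1: last column
theorem pass1_inv (m : List (List Int)) (r c : Nat) (hr : m.length = r) (hc : 1 ≤ c)
    (hlen : ∀ rw ∈ m, c ≤ rw.length) (n : Nat) (hn : n ≤ r - 1) (hr1 : 1 ≤ r)
    (dr : List (List Int) × List (List Int))
    (h : StInv m r c (fun i j => j = c - 1 ∧ n ≤ i) dr) :
    StInv m r c (fun i j => j = c - 1)
      ((PySem.List.pyRange ((n : Int) - 1) (-1) (-1)).foldl (pass1Step m (c : Int)) dr) := by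
  induction n generalizing dr with
  | zero =>
    rw [show ((0 : Nat) : Int) - 1 = -1 by norm_num, PySem.List.pyRange_neg_one_eq_nil (by omega),
      List.foldl_nil]
    exact Inv_weaken h (fun i j _ _ hp => hp.1)
      (fun i j _ _ hq hn' => absurd ⟨hq, Nat.zero_le i⟩ hn')
  | succ n ih =>
    have h1 : ((n + 1 : Nat) : Int) - 1 = (n : Int) := by push_cast; ring
    rw [h1, PySem.List.pyRange_neg_one_cons (by omega), List.foldl_cons]
    refine ih (by omega) _ ?_
    have hcc : (c : Int) - 1 = ((c - 1 : Nat) : Int) := by omega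
    have hnn : (n : Int) + 1 = ((n + 1 : Nat) : Int) := by push_cast; ring
    have hmemn : m.getD n [] ∈ m := by
      rw [List.getD_eq_getElem (hn := by omega)]
      exact List.getElem_mem (by omega)
    have hcl : c ≤ (m.getD n []).length := hlen _ hmemn
    have hread : G dr.1 (n + 1) (c - 1) = dSpec m (n + 1) (c - 1) :=
      ((h.2.2 (n + 1) (c - 1) (by omega) (by omega)).1 ⟨rfl, le_refl _⟩).1
    unfold pass1Step
    rw [hcc, hnn]
    simp only [mGet_cast, mSet_cast]
    by_cases hM : G m n (c - 1) = 1
    · rw [if_pos hM]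
      have hM' : (m.getD n []).getD (c - 1) 0 = 1 := hM
      have hvd : G dr.1 (n + 1) (c - 1) + 1 = dSpec m n (c - 1) := by
        rw [hread, dSpec_eq m n (c - 1) (by omega), if_pos hM']
      have hvr : (1 : Int) = rSpec m c n (c - 1) := by
        rw [rSpec_eq m c n (c - 1) (by omega) hcl, if_pos hM',
          show c - 1 + 1 = c by omega, rSpec_end]
        norm_num
      refine Inv_weaken (Inv_set h (by omega) (by omega) hvd hvr) ?_ ?_
      · rintro i j _ _ (⟨hj, hi⟩ | ⟨rfl, rfl⟩)
        · exact ⟨hj, by omega⟩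
        · exact ⟨rfl, le_refl _⟩
      · rintro i j hi hj ⟨rfl, hni⟩ hnp
        exfalso
        rcases Nat.eq_or_lt_of_le hni with rfl | hlt
        · exact hnp (Or.inr ⟨rfl, rfl⟩)
        · exact hnp (Or.inl ⟨rfl, hlt⟩)
    · rw [if_neg hM]
      have hM' : ¬ (m.getD n []).getD (c - 1) 0 = 1 := hM
      have hvd : (0 : Int) = dSpec m n (c - 1) := by
        rw [dSpec_eq m n (c - 1) (by omega), if_neg hM']
      have hvr : (0 : Int) = rSpec m c n (c - 1) := by
        rw [rSpec_eq m c n (c - 1) (by omega) hcl, if_neg hM']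
      refine Inv_weaken (Inv_set h (by omega) (by omega) hvd hvr) ?_ ?_
      · rintro i j _ _ (⟨hj, hi⟩ | ⟨rfl, rfl⟩)
        · exact ⟨hj, by omega⟩
        · exact ⟨rfl, le_refl _⟩
      · rintro i j hi hj ⟨rfl, hni⟩ hnp
        exfalso
        rcases Nat.eq_or_lt_of_le hni with rfl | hlt
        · exact hnp (Or.inr ⟨rfl, rfl⟩)
        · exact hnp (Or.inl ⟨rfl, hlt⟩)

-- pass 2: last row
theorem pass2_inv (m : List (List Int)) (r c : Nat) (hr : m.length = r) (hc : 1 ≤ c)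
    (hlen : ∀ rw ∈ m, c ≤ rw.length) (n : Nat) (hn : n ≤ c - 1) (hr1 : 1 ≤ r)
    (dr : List (List Int) × List (List Int))
    (h : StInv m r c (fun i j => j = c - 1 ∨ (i = r - 1 ∧ n ≤ j)) dr) :
    StInv m r c (fun i j => j = c - 1 ∨ i = r - 1)
      ((PySem.List.pyRange ((n : Int) - 1) (-1) (-1)).foldl (pass2Step m (r : Int)) dr) := by
  induction n generalizing dr with
  | zero =>
    rw [show ((0 : Nat) : Int) - 1 = -1 by norm_num, PySem.List.pyRange_neg_one_eq_nil (by omega),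
      List.foldl_nil]
    refine Inv_weaken h ?_ ?_
    · rintro i j _ _ (hj | ⟨rfl, _⟩)
      · exact Or.inl hj
      · exact Or.inr rfl
    · rintro i j hi hj (hj' | rfl) hnp
      · exact absurd (Or.inl hj') hnp
      · exact absurd (Or.inr ⟨rfl, Nat.zero_le j⟩) hnp
  | succ n ih =>
    have h1 : ((n + 1 : Nat) : Int) - 1 = (n : Int) := by push_cast; ring
    rw [h1, PySem.List.pyRange_neg_one_cons (by omega), List.foldl_cons]
    refine ih (by omega) _ ?_
    have hrr : (r : Int) - 1 = ((r - 1 : Nat) : Int) := by omega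
    have hnn : (n : Int) + 1 = ((n + 1 : Nat) : Int) := by push_cast; ring
    have hmemn : m.getD (r - 1) [] ∈ m := by
      rw [List.getD_eq_getElem (hn := by omega)]
      exact List.getElem_mem (by omega)
    have hcl : c ≤ (m.getD (r - 1) []).length := hlen _ hmemn
    have hread : G dr.2 (r - 1) (n + 1) = rSpec m c (r - 1) (n + 1) :=
      ((h.2.2 (r - 1) (n + 1) (by omega) (by omega)).1 (Or.inr ⟨rfl, le_refl _⟩)).2
    unfold pass2Step
    rw [hrr, hnn]
    simp only [mGet_cast, mSet_cast]
    by_cases hM : G m (r - 1) n = 1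
    · rw [if_pos hM]
      have hM' : (m.getD (r - 1) []).getD n 0 = 1 := hM
      have hvd : (1 : Int) = dSpec m (r - 1) n := by
        rw [dSpec_eq m (r - 1) n (by omega), if_pos hM',
          dSpec_bottom m (r - 1 + 1) n (by omega)]
        norm_num
      have hvr : G dr.2 (r - 1) (n + 1) + 1 = rSpec m c (r - 1) n := by
        rw [hread, rSpec_eq m c (r - 1) n (by omega) hcl, if_pos hM']
      refine Inv_weaken (Inv_set h (by omega) (by omega) hvd hvr) ?_ ?_
      · rintro i j _ _ ((hj | ⟨rfl, ht⟩) | ⟨rfl, rfl⟩)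
        · exact Or.inl hj
        · exact Or.inr ⟨rfl, by omega⟩
        · exact Or.inr ⟨rfl, le_refl _⟩
      · rintro i j hi hj (hj' | ⟨rfl, hnj⟩) hnp
        · exact absurd (Or.inl (Or.inl hj')) hnp
        · rcases Nat.eq_or_lt_of_le hnj with rfl | hlt
          · exact absurd (Or.inr ⟨rfl, rfl⟩) hnp
          · exact absurd (Or.inl (Or.inr ⟨rfl, by omega⟩)) hnp
    · rw [if_neg hM]
      have hM' : ¬ (m.getD (r - 1) []).getD n 0 = 1 := hM
      have hvd : (0 : Int) = dSpec m (r - 1) n := by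
        rw [dSpec_eq m (r - 1) n (by omega), if_neg hM']
      have hvr : (0 : Int) = rSpec m c (r - 1) n := by
        rw [rSpec_eq m c (r - 1) n (by omega) hcl, if_neg hM']
      refine Inv_weaken (Inv_set h (by omega) (by omega) hvd hvr) ?_ ?_
      · rintro i j _ _ ((hj | ⟨rfl, ht⟩) | ⟨rfl, rfl⟩)
        · exact Or.inl hj
        · exact Or.inr ⟨rfl, by omega⟩
        · exact Or.inr ⟨rfl, le_refl _⟩
      · rintro i j hi hj (hj' | ⟨rfl, hnj⟩) hnp
        · exact absurd (Or.inl (Or.inl hj')) hnp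
        · rcases Nat.eq_or_lt_of_le hnj with rfl | hlt
          · exact absurd (Or.inr ⟨rfl, rfl⟩) hnp
          · exact absurd (Or.inl (Or.inr ⟨rfl, by omega⟩)) hnp

-- pass 3 inner loop, row a
theorem pass3_inner_inv (m : List (List Int)) (r c : Nat) (hr : m.length = r) (hc : 1 ≤ c)
    (hlen : ∀ rw ∈ m, c ≤ rw.length) (a : Nat) (ha : a + 1 ≤ r - 1) (n : Nat) (hn : n ≤ c - 1)
    (dr : List (List Int) × List (List Int))
    (h : StInv m r c (fun i j => j = c - 1 ∨ i = r - 1 ∨ a + 1 ≤ i ∨ (i = a ∧ n ≤ j)) dr) :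
    StInv m r c (fun i j => j = c - 1 ∨ i = r - 1 ∨ a ≤ i)
      ((PySem.List.pyRange ((n : Int) - 1) (-1) (-1)).foldl (pass3Step m (a : Int)) dr) := by
  induction n generalizing dr with
  | zero =>
    rw [show ((0 : Nat) : Int) - 1 = -1 by norm_num, PySem.List.pyRange_neg_one_eq_nil (by omega),
      List.foldl_nil]
    refine Inv_weaken h ?_ ?_
    · rintro i j _ _ (hj | hi | hia | ⟨rfl, _⟩)
      · exact Or.inl hj
      · exact Or.inr (Or.inl hi)
      · exact Or.inr (Or.inr (by omega))
      · exact Or.inr (Or.inr (le_refl _))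
    · rintro i j hi hj (hj' | hi' | hai) hnp
      · exact absurd (Or.inl hj') hnp
      · exact absurd (Or.inr (Or.inl hi')) hnp
      · rcases Nat.eq_or_lt_of_le hai with rfl | hlt
        · exact absurd (Or.inr (Or.inr (Or.inr ⟨rfl, Nat.zero_le _⟩))) hnp
        · exact absurd (Or.inr (Or.inr (Or.inl (by omega)))) hnp
  | succ n ih =>
    have h1 : ((n + 1 : Nat) : Int) - 1 = (n : Int) := by push_cast; ring
    rw [h1, PySem.List.pyRange_neg_one_cons (by omega), List.foldl_cons]
    refine ih (by omega) _ ?_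
    have hnn : (n : Int) + 1 = ((n + 1 : Nat) : Int) := by push_cast; ring
    have haa : (a : Int) + 1 = ((a + 1 : Nat) : Int) := by push_cast; ring
    have hmemn : m.getD a [] ∈ m := by
      rw [List.getD_eq_getElem (hn := by omega)]
      exact List.getElem_mem (by omega)
    have hcl : c ≤ (m.getD a []).length := hlen _ hmemn
    have hreadd : G dr.1 (a + 1) n = dSpec m (a + 1) n :=
      ((h.2.2 (a + 1) n (by omega) (by omega)).1 (Or.inr (Or.inr (Or.inl (le_refl _))))).1
    have hreadr : G dr.2 a (n + 1) = rSpec m c a (n + 1) :=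
      ((h.2.2 a (n + 1) (by omega) (by omega)).1 (Or.inr (Or.inr (Or.inr ⟨rfl, le_refl _⟩)))).2
    unfold pass3Step
    rw [hnn, haa]
    simp only [mGet_cast, mSet_cast]
    by_cases hM : G m a n = 1
    · rw [if_pos hM]
      have hM' : (m.getD a []).getD n 0 = 1 := hM
      have hvd : G dr.1 (a + 1) n + 1 = dSpec m a n := by
        rw [hreadd, dSpec_eq m a n (by omega), if_pos hM']
      have hvr : G dr.2 a (n + 1) + 1 = rSpec m c a n := by
        rw [hreadr, rSpec_eq m c a n (by omega) hcl, if_pos hM']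
      refine Inv_weaken (Inv_set h (by omega) (by omega) hvd hvr) ?_ ?_
      · rintro i j _ _ ((hj | hi | hia | ⟨rfl, ht⟩) | ⟨rfl, rfl⟩)
        · exact Or.inl hj
        · exact Or.inr (Or.inl hi)
        · exact Or.inr (Or.inr (Or.inl hia))
        · exact Or.inr (Or.inr (Or.inr ⟨rfl, by omega⟩))
        · exact Or.inr (Or.inr (Or.inr ⟨rfl, le_refl _⟩))
      · rintro i j hi hj (hj' | hi' | hia | ⟨rfl, hnj⟩) hnp
        · exact absurd (Or.inl (Or.inl hj')) hnp
        · exact absurd (Or.inl (Or.inr (Or.inl hi'))) hnp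
        · exact absurd (Or.inl (Or.inr (Or.inr (Or.inl hia)))) hnp
        · rcases Nat.eq_or_lt_of_le hnj with rfl | hlt
          · exact absurd (Or.inr ⟨rfl, rfl⟩) hnp
          · exact absurd (Or.inl (Or.inr (Or.inr (Or.inr ⟨rfl, by omega⟩)))) hnp
    · rw [if_neg hM]
      have hM' : ¬ (m.getD a []).getD n 0 = 1 := hM
      have hvd : (0 : Int) = dSpec m a n := by
        rw [dSpec_eq m a n (by omega), if_neg hM']
      have hvr : (0 : Int) = rSpec m c a n := by
        rw [rSpec_eq m c a n (by omega) hcl, if_neg hM']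
      refine Inv_weaken (Inv_set h (by omega) (by omega) hvd hvr) ?_ ?_
      · rintro i j _ _ ((hj | hi | hia | ⟨rfl, ht⟩) | ⟨rfl, rfl⟩)
        · exact Or.inl hj
        · exact Or.inr (Or.inl hi)
        · exact Or.inr (Or.inr (Or.inl hia))
        · exact Or.inr (Or.inr (Or.inr ⟨rfl, by omega⟩))
        · exact Or.inr (Or.inr (Or.inr ⟨rfl, le_refl _⟩))
      · rintro i j hi hj (hj' | hi' | hia | ⟨rfl, hnj⟩) hnp
        · exact absurd (Or.inl (Or.inl hj')) hnp
        · exact absurd (Or.inl (Or.inr (Or.inl hi'))) hnp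
        · exact absurd (Or.inl (Or.inr (Or.inr (Or.inl hia)))) hnp
        · rcases Nat.eq_or_lt_of_le hnj with rfl | hlt
          · exact absurd (Or.inr ⟨rfl, rfl⟩) hnp
          · exact absurd (Or.inl (Or.inr (Or.inr (Or.inr ⟨rfl, by omega⟩)))) hnp

-- pass 3 outer loop
theorem pass3_outer_inv (m : List (List Int)) (r c : Nat) (hr : m.length = r) (hc : 1 ≤ c)
    (hlen : ∀ rw ∈ m, c ≤ rw.length) (n : Nat) (hn : n ≤ r - 1) (hr1 : 1 ≤ r)
    (dr : List (List Int) × List (List Int))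
    (h : StInv m r c (fun i j => j = c - 1 ∨ i = r - 1 ∨ n ≤ i) dr) :
    StInv m r c (fun i j => j = c - 1 ∨ i = r - 1 ∨ 0 ≤ i)
      ((PySem.List.pyRange ((n : Int) - 1) (-1) (-1)).foldl
        (fun dr i => (PySem.List.pyRange ((c : Int) - 2) (-1) (-1)).foldl (pass3Step m i) dr) dr) := by
  induction n generalizing dr with
  | zero =>
    rw [show ((0 : Nat) : Int) - 1 = -1 by norm_num,
      PySem.List.pyRange_neg_one_eq_nil (show (-1 : Int) ≤ -1 by omega), List.foldl_nil]
    exact h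
  | succ n ih =>
    have h1 : ((n + 1 : Nat) : Int) - 1 = (n : Int) := by push_cast; ring
    rw [h1, PySem.List.pyRange_neg_one_cons (show (-1 : Int) < ((n : Nat) : Int) by omega),
      List.foldl_cons]
    refine ih (by omega) _ ?_
    dsimp only
    rw [show ((c : Int) - 2) = ((c - 1 : Nat) : Int) - 1 by omega]
    refine pass3_inner_inv m r c hr hc hlen n (by omega) (c - 1) (le_refl _) _ ?_
    refine Inv_weaken h ?_ ?_
    · rintro i j _ _ (hj | hi | hni)
      · exact Or.inl hj
      · exact Or.inr (Or.inl hi)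
      · exact Or.inr (Or.inr (Or.inl hni))
    · rintro i j hi hj (hj' | hi' | hni | ⟨rfl, hcj⟩) hnp
      · exact absurd (Or.inl hj') hnp
      · exact absurd (Or.inr (Or.inl hi')) hnp
      · exact absurd (Or.inr (Or.inr (by omega))) hnp
      · exact absurd (Or.inl (by omega)) hnp

-- a fully specified StInv yields the spec matrices
theorem eq_of_Inv (m : List (List Int)) (r c : Nat) (hr : m.length = r)
    {P : Nat → Nat → Prop} (hP : ∀ i j, i < r → j < c → P i j)
    (dr : List (List Int) × List (List Int)) (h : StInv m r c P dr) :
    dr = (specDown m c, specRight m c) := by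
  obtain ⟨⟨hdl, hdr⟩, ⟨hgl, hgr⟩, hprop⟩ := h
  refine Prod.ext ?_ ?_
  · apply List.ext_getElem (by simp [specDown, hdl, hr])
    intro i hi1 hi2
    have hir : i < r := by omega
    apply List.ext_getElem
    · rw [hdr _ (List.getElem_mem hi1)]
      simp [specDown]
    intro j hj1 hj2
    have hjc : j < c := by
      have := hdr _ (List.getElem_mem hi1); omega
    have hG : G dr.1 i j = dr.1[i][j] := by
      unfold G
      rw [List.getD_eq_getElem (hn := hi1), List.getD_eq_getElem (hn := hj1)]
    simp only [specDown, List.getElem_map, List.getElem_range]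
    rw [← hG]
    exact ((hprop i j hir hjc).1 (hP i j hir hjc)).1
  · apply List.ext_getElem (by simp [specRight, hgl, hr])
    intro i hi1 hi2
    have hir : i < r := by omega
    apply List.ext_getElem
    · rw [hgr _ (List.getElem_mem hi1)]
      simp [specRight]
    intro j hj1 hj2
    have hjc : j < c := by
      have := hgr _ (List.getElem_mem hi1); omega
    have hG : G dr.2 i j = dr.2[i][j] := by
      unfold G
      rw [List.getD_eq_getElem (hn := hi1), List.getD_eq_getElem (hn := hj1)]
    simp only [specRight, List.getElem_map, List.getElem_range]
    rw [← hG]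
    exact ((hprop i j hir hjc).1 (hP i j hir hjc)).2

-- A computes the spec matrices
theorem A_eq_spec (m : List (List Int)) (hne : m ≠ [])
    (hc : 1 ≤ (m.headD []).length) (hlen : ∀ rw ∈ m, (m.headD []).length ≤ rw.length) :
    set_border_map m = (specDown m (m.headD []).length, specRight m (m.headD []).length) := by
  have hr1 : 1 ≤ m.length := List.length_pos_iff.mpr hne
  have hhead : PySem.List.pyGetD m 0 [] = m.headD [] := by
    cases m with
    | nil => exact absurd rfl hne
    | cons a t => simp [PySem.List.pyGetD_zero_cons]
  simp only [set_border_map]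
  rw [hhead]
  simp only [PySem.List.len_eq]
  set r := m.length with hrdef
  set c := (m.headD []).length with hcdef
  have hc : 1 ≤ c := hc
  have hlen : ∀ rw ∈ m, c ≤ rw.length := hlen
  rw [show ((r : Int) - 1) = ((r - 1 : Nat) : Int) by omega,
    show ((c : Int) - 1) = ((c - 1 : Nat) : Int) by omega]
  simp only [mGet_cast, mSet_cast]
  have hmem : m.getD (r - 1) [] ∈ m := by
    rw [List.getD_eq_getElem (hn := by omega)]
    exact List.getElem_mem (by omega)
  have hcl : c ≤ (m.getD (r - 1) []).length := hlen _ hmem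
  have hInv0 : StInv m r c (fun _ _ => False)
      ((PySem.List.pyRange 0 (r : Int) 1).map
        (fun _ => (PySem.List.pyRange 0 (c : Int) 1).map (fun _ => (0 : Int))),
       (PySem.List.pyRange 0 (r : Int) 1).map
        (fun _ => (PySem.List.pyRange 0 (c : Int) 1).map (fun _ => (0 : Int)))) :=
    ⟨Shape_zeros r c, Shape_zeros r c,
     fun i j _ _ => ⟨fun hF => hF.elim, fun _ => ⟨G_zeros r c i j, G_zeros r c i j⟩⟩⟩
  have hbase : StInv m r c (fun i j => j = c - 1 ∧ r - 1 ≤ i)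
      (if G m (r - 1) (c - 1) = 1 then
        (((PySem.List.pyRange 0 (r : Int) 1).map
            (fun _ => (PySem.List.pyRange 0 (c : Int) 1).map (fun _ => (0 : Int)))).set (r - 1)
          ((((PySem.List.pyRange 0 (r : Int) 1).map
            (fun _ => (PySem.List.pyRange 0 (c : Int) 1).map (fun _ => (0 : Int)))).getD (r - 1) []).set (c - 1) 1),
         ((PySem.List.pyRange 0 (r : Int) 1).map
            (fun _ => (PySem.List.pyRange 0 (c : Int) 1).map (fun _ => (0 : Int)))).set (r - 1)
          ((((PySem.List.pyRange 0 (r : Int) 1).map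
            (fun _ => (PySem.List.pyRange 0 (c : Int) 1).map (fun _ => (0 : Int)))).getD (r - 1) []).set (c - 1) 1))
      else
        ((PySem.List.pyRange 0 (r : Int) 1).map
          (fun _ => (PySem.List.pyRange 0 (c : Int) 1).map (fun _ => (0 : Int))),
         (PySem.List.pyRange 0 (r : Int) 1).map
          (fun _ => (PySem.List.pyRange 0 (c : Int) 1).map (fun _ => (0 : Int))))) := by
    by_cases hM : G m (r - 1) (c - 1) = 1
    · rw [if_pos hM]
      have hM' : (m.getD (r - 1) []).getD (c - 1) 0 = 1 := hM
      have hvd : (1 : Int) = dSpec m (r - 1) (c - 1) := by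
        rw [dSpec_eq m (r - 1) (c - 1) (by omega), if_pos hM',
          dSpec_bottom m (r - 1 + 1) (c - 1) (by omega)]
        norm_num
      have hvr : (1 : Int) = rSpec m c (r - 1) (c - 1) := by
        rw [rSpec_eq m c (r - 1) (c - 1) (by omega) hcl, if_pos hM',
          show c - 1 + 1 = c by omega, rSpec_end]
        norm_num
      refine Inv_weaken (Inv_set hInv0 (by omega) (by omega) hvd hvr) ?_ ?_
      · rintro i j _ _ (hF | ⟨rfl, rfl⟩)
        · exact hF.elim
        · exact ⟨rfl, le_refl _⟩
      · rintro i j hi hj ⟨rfl, hri⟩ hnp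
        exfalso
        exact hnp (Or.inr ⟨by omega, rfl⟩)
    · rw [if_neg hM]
      have hM' : ¬ (m.getD (r - 1) []).getD (c - 1) 0 = 1 := hM
      refine Inv_weaken hInv0 (fun i j _ _ hF => hF.elim) ?_
      rintro i j hi hj ⟨rfl, hri⟩ _
      have hieq : i = r - 1 := by omega
      subst hieq
      constructor
      · rw [dSpec_eq m (r - 1) (c - 1) (by omega), if_neg hM']
      · rw [rSpec_eq m c (r - 1) (c - 1) (by omega) hcl, if_neg hM']
  have p1 := pass1_inv m r c rfl hc hlen (r - 1) (le_refl _) hr1 _ hbase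
  rw [show ((r - 1 : Nat) : Int) - 1 = (r : Int) - 2 by omega] at p1
  have p2start := Inv_weaken (Q := fun i j => j = c - 1 ∨ (i = r - 1 ∧ c - 1 ≤ j)) p1
    (fun i j _ _ hj => Or.inl hj)
    (fun i j hi hj hq hnp => by
      rcases hq with hj' | ⟨rfl, hcj⟩
      · exact absurd hj' hnp
      · exact absurd (by omega : j = c - 1) hnp)
  have p2 := pass2_inv m r c rfl hc hlen (c - 1) (le_refl _) hr1 _ p2start
  rw [show ((c - 1 : Nat) : Int) - 1 = (c : Int) - 2 by omega] at p2
  have p3start := Inv_weaken (Q := fun i j => j = c - 1 ∨ i = r - 1 ∨ r - 1 ≤ i) p2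
    (fun i j _ _ hp => by
      rcases hp with hj | hi
      · exact Or.inl hj
      · exact Or.inr (Or.inl hi))
    (fun i j hi hj hq hnp => by
      rcases hq with hj' | hi' | hri
      · exact absurd (Or.inl hj') hnp
      · exact absurd (Or.inr hi') hnp
      · exact absurd (Or.inr (by omega : i = r - 1)) hnp)
  have p3 := pass3_outer_inv m r c rfl hc hlen (r - 1) (le_refl _) hr1 _ p3start
  rw [show ((r - 1 : Nat) : Int) - 1 = (r : Int) - 2 by omega] at p3
  exact eq_of_Inv m r c rfl (fun i j _ _ => Or.inr (Or.inr (Nat.zero_le _))) _ p3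

-- ===== B side =====
theorem rightRowB_eq (xs : List Int) :
    rightRowB xs = (List.range xs.length).map (fun j => rAux (xs.drop j)) := by
  have key : ∀ (ys : List Int),
      ys.reverse.foldl (fun (p : List Int × Int) x =>
        ((p.1 ++ [if x = 1 then p.2 + 1 else 0]), if x = 1 then p.2 + 1 else 0)) ([], 0)
      = ((((List.range ys.length).map (fun j => rAux (ys.drop j)))).reverse, rAux ys) := by
    intro ys
    induction ys with
    | nil => rfl
    | cons x xs ih =>
      rw [List.reverse_cons, List.foldl_append, ih]
      simp only [List.foldl_cons, List.foldl_nil]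
      have hv : (if x = 1 then rAux xs + 1 else 0) = rAux (x :: xs) := by simp [rAux]
      rw [hv]
      have hmap : (List.range (x :: xs).length).map (fun j => rAux ((x :: xs).drop j))
          = rAux (x :: xs) :: (List.range xs.length).map (fun j => rAux (xs.drop j)) := by
        rw [List.length_cons, List.range_succ_eq_map, List.map_cons, List.map_map]
        simp [Function.comp_def, List.drop_succ_cons, Nat.succ_eq_add_one]
      rw [hmap, List.reverse_cons]
  simp only [rightRowB]
  rw [key, List.reverse_reverse]

def dRow (c : Nat) (ms : List (List Int)) : List Int :=
  (List.range c).map (fun j => dAux ms j)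

theorem downRowsB_eq (c : Nat) (ms : List (List Int)) :
    downRowsB ms (c : Int) = (List.range ms.length).map (fun i => dRow c (ms.drop i)) := by
  have hz : ((PySem.List.pyRange 0 (c : Int) 1).map (fun _ => (0 : Int))) = dRow c [] := by
    rw [PySem.List.pyRange_zero_natCast, List.map_map]
    simp [dRow, dAux, Function.comp_def]
  have hcur : ∀ (mrow : List Int) (ms' : List (List Int)),
      ((PySem.List.pyRange 0 (c : Int) 1).map
        (fun j => if PySem.List.pyGetD mrow j 0 = 1 then PySem.List.pyGetD (dRow c ms') j 0 + 1 else 0))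
      = dRow c (mrow :: ms') := by
    intro mrow ms'
    rw [PySem.List.pyRange_zero_natCast, List.map_map]
    unfold dRow
    apply List.map_congr_left
    intro k hk
    have hk' : k < c := List.mem_range.mp hk
    simp only [Function.comp_def, PySem.List.pyGetD_natCast]
    have hget : (List.map (fun j => dAux ms' j) (List.range c)).getD k 0 = dAux ms' k := by
      rw [List.getD_eq_getElem (hn := by simpa using hk'), List.getElem_map, List.getElem_range]
    rw [hget]
    simp [dAux]
  have key : ∀ (t : List (List Int)),
      t.reverse.foldl (fun (p : List (List Int) × List Int) mrow =>
        (p.1 ++ [(PySem.List.pyRange 0 (c : Int) 1).map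
          (fun j => if PySem.List.pyGetD mrow j 0 = 1 then PySem.List.pyGetD p.2 j 0 + 1 else 0)],
         (PySem.List.pyRange 0 (c : Int) 1).map
          (fun j => if PySem.List.pyGetD mrow j 0 = 1 then PySem.List.pyGetD p.2 j 0 + 1 else 0)))
        ([], (PySem.List.pyRange 0 (c : Int) 1).map (fun _ => (0 : Int)))
      = ((((List.range t.length).map (fun i => dRow c (t.drop i)))).reverse, dRow c t) := by
    intro t
    induction t with
    | nil => simp [hz]
    | cons mrow ms' ih =>
      rw [List.reverse_cons, List.foldl_append, ih]
      simp only [List.foldl_cons, List.foldl_nil]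
      rw [hcur]
      have hmap : (List.range (mrow :: ms').length).map (fun i => dRow c ((mrow :: ms').drop i))
          = dRow c (mrow :: ms') :: (List.range ms'.length).map (fun i => dRow c (ms'.drop i)) := by
        rw [List.length_cons, List.range_succ_eq_map, List.map_cons, List.map_map]
        simp [Function.comp_def, List.drop_succ_cons, Nat.succ_eq_add_one]
      rw [hmap, List.reverse_cons]
  simp only [downRowsB]
  rw [key, List.reverse_reverse]

theorem B_eq_spec (m : List (List Int)) (hne : m ≠ [])
    (hlen : ∀ rw ∈ m, (m.headD []).length ≤ rw.length) :
    set_border_map_alt m = (specDown m (m.headD []).length, specRight m (m.headD []).length) := by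
  have hhead : PySem.List.pyGetD m 0 [] = m.headD [] := by
    cases m with
    | nil => exact absurd rfl hne
    | cons a t => simp [PySem.List.pyGetD_zero_cons]
  simp only [set_border_map_alt]
  rw [hhead, PySem.List.len_eq]
  refine Prod.ext ?_ ?_
  · show downRowsB m ((m.headD []).length : Int) = specDown m (m.headD []).length
    rw [downRowsB_eq]
    unfold specDown dRow dSpec
    rfl
  · show m.map (fun r => rightRowB (PySem.List.slice r none (some ((m.headD []).length : Int))))
      = specRight m (m.headD []).length
    unfold specRight
    apply List.ext_getElem (by simp)
    intro i h1 h2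
    have h1' : i < m.length := by simpa using h1
    rw [List.getElem_map, List.getElem_map, List.getElem_range]
    rw [PySem.List.slice_to_natCast, rightRowB_eq]
    have hcl : (m.headD []).length ≤ m[i].length := hlen _ (List.getElem_mem h1')
    have hl : (m[i].take (m.headD []).length).length = (m.headD []).length := by
      simp only [List.length_take]; omega
    rw [hl]
    apply List.map_congr_left
    intro j hj
    unfold rSpec
    rw [List.getD_eq_getElem (hn := h1')]

-- ===== VERDICT (by name: the statement is the Claim_ definition above) =====
theorem set_border_map_spec : Claim_equal_set_border_map := by
  intro m _ hpre
  obtain ⟨hne, hc, hlen⟩ := hpre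
  unfold Spec_set_border_map
  rw [A_eq_spec m hne hc hlen, B_eq_spec m hne hlen]
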